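-- pv_equiv track=rewrite | github.com/Mmajee/School-Projects | PythonA7/functions.py | is_valid_isbn
-- ===== SOURCE A (Python) =====
-- def is_valid_isbn(isbn):
--     """
--     -------------------------------------------------------
--     Determines if an ISBN string is valid. An ISBN string is valid if:
--         - it consists of only digits and dashes ('-')
--         - it contains 5 groups of digits separated by dashes
--         - its first group of digits is either '978' or '979'
--         - its final group of digits is a single digit
--         - its entire length is 17 characters
--     Use: valid = is_valid_isbn(isbn)
--     -------------------------------------------------------
--     Parameters:
--         isbn - a string (str)
--     Returns:
--         valid - True if isbn is valid, False otherwise (boolean)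
--     -------------------------------------------------------
--     """
--
--     valid = True
--
--     count = 0
--     dashes = 0
--
--     while valid and count < len(isbn):
--
--         if isbn[count] == '-':
--             dashes += 1
--
--         if isbn[count].isalpha():
--             valid = False
--
--         elif isbn[0:3] != '978' and '979':
--             valid = False
--
--         elif isbn[-2] != '-':
--             valid = False
--
--         elif len(isbn) != 17:
--             valid = False
--
--         elif isbn[count:count + 2] == '--':
--             valid = False
--
--         count += 1
--
--     if dashes != 4:
--         valid = False
--
--     return valid
-- ===== SOURCE B (Python) =====
-- def is_valid_isbn(isbn):
--     return (len(isbn) == 17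
--             and isbn[0:3] == '978'
--             and isbn[-2] == '-'
--             and sum(c == '-' for c in isbn) == 4
--             and '--' not in isbn
--             and not any(c.isalpha() for c in isbn))
-- ===== Notes on version B (the rewrite author's own statement) =====
-- stated objective: simpler
-- what changed: Replaced the flag-driven indexed while-loop with one boolean conjunction of independent whole-string guard tests (length, '978' prefix, dash at index -2, dash total, no '--', no alphabetic character), deliberately keeping A's accepted quirks (only '978', arbitrary non-alphabetic symbols allowed).
import Mathlib
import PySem

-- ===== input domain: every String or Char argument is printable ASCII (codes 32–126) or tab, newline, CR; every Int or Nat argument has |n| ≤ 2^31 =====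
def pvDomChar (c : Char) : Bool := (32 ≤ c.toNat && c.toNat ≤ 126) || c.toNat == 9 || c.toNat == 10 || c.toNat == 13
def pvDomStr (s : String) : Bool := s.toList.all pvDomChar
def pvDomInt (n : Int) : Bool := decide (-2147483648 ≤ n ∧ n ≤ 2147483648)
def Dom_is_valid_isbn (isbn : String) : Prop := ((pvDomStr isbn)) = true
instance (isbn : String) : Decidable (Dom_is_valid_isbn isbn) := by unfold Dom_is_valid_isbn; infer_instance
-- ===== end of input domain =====

-- B replaces A's flag-driven indexed while-loop by a single conjunction of independent
-- whole-string guard tests; same results on every input (simpler decomposition, same cost).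


-- ===== PORT A =====
-- per-index validity test of A's loop body, branches in A's order
-- (t.getD i ' ' : only evaluated with i < t.length, where it is t[i]; the default is never read)
def pvCondA (t : List Char) (i : Nat) : Bool :=
  if PySem.Chars.isalpha (t.getD i ' ') then false
  else if PySem.List.slice t (some 0) (some 3) ≠ ['9', '7', '8'] then false
  -- isbn[0:3] != '978' and '979'  — the '979' operand is truthy, so the test is just ≠ '978';
  -- isbn[-2]: reached only after the prefix test passed, so t.length ≥ 3 and pyGet? is some
  else if PySem.List.pyGet? t (-2) ≠ some '-' then false
  else if t.length ≠ 17 then false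
  else if PySem.List.slice t (some (i : Int)) (some ((i : Int) + 2)) = ['-', '-'] then false
  else true

-- the while-loop: state (valid, count, dashes); exits as soon as valid is false
def pvAloop (t : List Char) (count : Nat) (dashes : Int) : Bool × Int :=
  if h : count < t.length then
    let dashes' := if t.getD count ' ' = '-' then dashes + 1 else dashes
    if pvCondA t count then pvAloop t (count + 1) dashes'
    else (false, dashes')
  else (true, dashes)
termination_by t.length - count

def is_valid_isbn (isbn : String) : Bool :=
  let r := pvAloop isbn.toList 0 0
  if r.2 ≠ 4 then false else r.1

-- ===== PORT B =====
def is_valid_isbn_alt (isbn : String) : Bool :=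
  let t := isbn.toList
  (t.length == 17)
  && (PySem.List.slice t (some 0) (some 3) == ['9', '7', '8'])
  && (PySem.List.pyGet? t (-2) == some '-')
  && ((t.map (fun c => if c == '-' then (1 : Int) else 0)).sum == 4)
  && !(PySem.Chars.isIn ['-', '-'] t)
  && !(t.any PySem.Chars.isalpha)

-- ===== PRECONDITION & SPEC =====
def Spec_is_valid_isbn (isbn : String) (out : Bool) : Prop := out = is_valid_isbn_alt isbn
instance (isbn : String) (out : Bool) : Decidable (Spec_is_valid_isbn isbn out) := by unfold Spec_is_valid_isbn; infer_instance

-- ===== CLAIM (what is proved, stated in full; the proofs are below) =====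
def Claim_equal_is_valid_isbn : Prop := ∀ (isbn : String), Dom_is_valid_isbn isbn → Spec_is_valid_isbn isbn (is_valid_isbn isbn)

-- ===== LEMMAS AND PROOFS =====

lemma pvAloop_spec (t : List Char) (count : Nat) (dashes : Int) :
    ((pvAloop t count dashes).1 = true ↔ ∀ i, count ≤ i → i < t.length → pvCondA t i = true) ∧
    ((pvAloop t count dashes).1 = true →
      (pvAloop t count dashes).2 = dashes + (((t.drop count).count '-' : Nat) : Int)) := by
  generalize hk : t.length - count = k
  induction k generalizing count dashes with
  | zero =>
      have hge : t.length ≤ count := by omega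
      rw [pvAloop]
      simp only [dif_neg (by omega : ¬ count < t.length)]
      constructor
      · constructor
        · intro _ i h1 h2; omega
        · intro _; trivial
      · intro _
        rw [List.drop_eq_nil_of_le hge]
        simp
  | succ k ih =>
      have hlt : count < t.length := by omega
      have ih' := ih (count + 1) (if t.getD count ' ' = '-' then dashes + 1 else dashes) (by omega)
      rw [pvAloop]
      simp only [dif_pos hlt]
      by_cases hc : pvCondA t count = true
      · simp only [hc, if_true]
        constructor
        · rw [ih'.1]
          constructor
          · intro h i h1 h2
            rcases Nat.eq_or_lt_of_le h1 with rfl | h1'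
            · exact hc
            · exact h i (by omega) h2
          · intro h i h1 h2; exact h i (by omega) h2
        · intro hv
          rw [ih'.2 hv]
          have hdrop : t.drop count = t[count] :: t.drop (count + 1) :=
            List.drop_eq_getElem_cons hlt
          have hg : t.getD count ' ' = t[count] := List.getD_eq_getElem t ' ' hlt
          rw [hdrop, List.count_cons, hg]
          by_cases hd : t[count] = '-'
          · simp [hd]; ring
          · simp [hd]
      · rw [Bool.not_eq_true] at hc
        simp only [hc, Bool.false_eq_true, if_false]
        constructor
        · simp only [false_iff]
          intro h
          exact absurd (h count le_rfl hlt) (by simp [hc])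
        · intro h; exact absurd h (by simp)

-- the per-index tests, repackaged as B's whole-string guards
lemma pvCondA_iff (t : List Char) (ht : t ≠ []) :
    (∀ i, i < t.length → pvCondA t i = true) ↔
      (PySem.List.slice t (some 0) (some 3) = ['9', '7', '8'] ∧
       PySem.List.pyGet? t (-2) = some '-' ∧
       t.length = 17 ∧
       (¬ ['-', '-'] <:+: t) ∧
       t.any PySem.Chars.isalpha = false) := by
  have hlen : 0 < t.length := List.length_pos_iff.mpr ht
  constructor
  · intro h
    have h0 := h 0 hlen
    unfold pvCondA at h0
    simp at h0
    obtain ⟨-, hp0, hm, hl, -⟩ := h0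
    have hp : PySem.List.slice t (some 0) (some 3) = ['9', '7', '8'] := by
      rw [PySem.List.slice_zero_start]; exact hp0
    refine ⟨hp, hm, hl, ?_, ?_⟩
    · -- no '--' infix
      intro hinf
      rcases hinf with ⟨pre, suf, heq⟩
      have hpref : ['-', '-'] <+: t.drop pre.length := by
        rw [← heq]
        simp
      have hplen : pre.length + 2 ≤ t.length := by
        have := congrArg List.length heq
        simp at this; omega
      have hslice : PySem.List.slice t (some (pre.length : Int)) (some ((pre.length : Int) + 2)) = ['-', '-'] := by
        have h2 : ((pre.length : Int) + 2) = ((pre.length + 2 : Nat) : Int) := by push_cast; ring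
        rw [h2, PySem.List.slice_natCast]
        rcases hpref with ⟨rest, hrest⟩
        rw [show pre.length + 2 - pre.length = 2 by omega, ← hrest]
        simp
      have hi := h pre.length (by omega)
      unfold pvCondA at hi
      simp [hp0, hm, hl, hslice] at hi
    · -- no alphabetic char anywhere
      rw [List.any_eq_false]
      intro c hc
      rcases List.mem_iff_getElem.mp hc with ⟨i, hi, rfl⟩
      have hh := h i hi
      unfold pvCondA at hh
      by_cases hx : PySem.Chars.isalpha t[i] = true
      · rw [List.getD_eq_getElem t ' ' hi] at hh
        simp [hx] at hh
      · simpa using hx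
  · rintro ⟨hp, hm, hl, hnd, hna⟩ i hi
    unfold pvCondA
    have hgi : t.getD i ' ' = t[i] := List.getD_eq_getElem t ' ' hi
    have hai : PySem.Chars.isalpha (t.getD i ' ') = false := by
      rw [hgi]
      rw [List.any_eq_false] at hna
      exact Bool.eq_false_iff.mpr fun hx => (by simpa using hna t[i] (List.getElem_mem hi) hx)
    have hsl : PySem.List.slice t (some (i : Int)) (some ((i : Int) + 2)) ≠ ['-', '-'] := by
      intro hx
      apply hnd
      have h2 : ((i : Int) + 2) = ((i + 2 : Nat) : Int) := by push_cast; ring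
      rw [h2, PySem.List.slice_natCast] at hx
      have h1 : ['-', '-'] <+: t.drop i := hx ▸ List.take_prefix _ _
      exact h1.isInfix.trans (List.drop_suffix i t).isInfix
    have hai' : PySem.Chars.isalpha (t[i]?.getD ' ') = false := by
      rw [← List.getD_eq_getElem?_getD]; exact hai
    rw [PySem.List.slice_zero_start] at hp
    simp [hai', hp, hm, hl, hsl]

-- B's dash-sum is the list count
lemma pvSum_count (t : List Char) :
    (t.map (fun c => if c = '-' then (1 : Int) else 0)).sum = ((t.count '-' : Nat) : Int) := by
  induction t with
  | nil => simp
  | cons c rest ih =>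
      simp only [List.map_cons, List.sum_cons, ih, List.count_cons]
      push_cast
      by_cases h : c = '-'
      · simp [h]; omega
      · simp [h]

-- ===== VERDICT (by name: the statement is the Claim_ definition above) =====
theorem is_valid_isbn_spec : Claim_equal_is_valid_isbn := by
  intro isbn _
  unfold Spec_is_valid_isbn is_valid_isbn is_valid_isbn_alt
  obtain ⟨hiff, hdash⟩ := pvAloop_spec isbn.toList 0 0
  set t := isbn.toList with hteq
  by_cases hv : (pvAloop t 0 0).1 = true
  · have hall : ∀ i, i < t.length → pvCondA t i = true :=
      fun i hi => (hiff.mp hv) i (Nat.zero_le _) hi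
    have hd : (pvAloop t 0 0).2 = ((t.count '-' : Nat) : Int) := by
      simpa using hdash hv
    by_cases ht : t = []
    · have h0 : pvAloop ([] : List Char) 0 0 = (true, 0) := by
        rw [pvAloop]; simp
      rw [ht]
      simp [h0]
    · obtain ⟨hp, hm, hl, hnd, hna⟩ := (pvCondA_iff t ht).mp hall
      have hni : PySem.Chars.isIn ['-', '-'] t = false := by
        have h' := hnd
        rw [← PySem.Chars.isIn_iff_infix] at h'
        simpa using h' 
      by_cases h4 : t.count '-' = 4
      · have hsum : (t.map (fun c => if c = '-' then (1 : Int) else 0)).sum = 4 := by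
          rw [pvSum_count, h4]; norm_num
        simp [hd, h4, hv, hl, hp, hm, hna, hni, hsum]
      · have h4' : ((t.count '-' : Nat) : Int) ≠ 4 := by exact_mod_cast h4
        simp [hd, h4']
        intro _ _ _ hsum _
        rw [pvSum_count] at hsum
        exact absurd hsum h4' 
  · have hv' : (pvAloop t 0 0).1 = false := by simpa using hv
    have ht : t ≠ [] := by
      rintro hnil
      rw [hnil, pvAloop] at hv'
      simp at hv'
    have hC : ¬ (PySem.List.slice t (some 0) (some 3) = ['9', '7', '8'] ∧
        PySem.List.pyGet? t (-2) = some '-' ∧ t.length = 17 ∧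
        (¬ ['-', '-'] <:+: t) ∧ t.any PySem.Chars.isalpha = false) :=
      fun hR => hv (hiff.mpr (fun i _ hi => ((pvCondA_iff t ht).mpr hR) i hi))
    simp only [hv', ite_self]
    refine Eq.symm (Bool.eq_false_iff.mpr ?_)
    intro hb
    simp only [Bool.and_eq_true, beq_iff_eq, Bool.not_eq_true'] at hb
    obtain ⟨⟨⟨⟨⟨hl, hp⟩, hm⟩, -⟩, hni⟩, hna⟩ := hb
    refine hC ⟨hp, hm, hl, ?_, hna⟩
    rw [← PySem.Chars.isIn_iff_infix]
    simp [hni]
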